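-- pv_equiv track=rewrite | github.com/edoardo-crypto/Customer-Success | find_dm_contacts.py | best_dm_from_contacts
-- ===== SOURCE A (Python) =====
-- DM_SIGNALS = [
--     "ceo", "founder", "co-founder", "cofounder", "owner", "director",
--     "cto", "coo", "president", "managing", "gerente", "fundador",
--     "propietari", "director general", "head of", "chief",
-- ]
--
-- GENERIC_PREFIXES = {
--     "info", "admin", "hola", "hello", "pedidos", "marketing", "press",
--     "contact", "sales", "soporte", "support", "web", "almacen", "export",
--     "data", "tienda", "shop", "orders", "ayuda", "contacto", "store",
-- }
--
-- def is_generic_email(email):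
--     if not email or "@" not in email:
--         return False
--     prefix = email.split("@")[0].lower()
--     return prefix in GENERIC_PREFIXES
--
-- def is_dm_title(title):
--     t = (title or "").lower()
--     return any(sig in t for sig in DM_SIGNALS)
--
-- def best_dm_from_contacts(contacts, exclude_email=None):
--     """
--     From a list of HubSpot/Intercom-style contact dicts with 'properties',
--     return the best DM candidate (excluding oper_email).
--     Priority: explicit DM title > named individual > generic email.
--     """
--     exc = (exclude_email or "").lower()
--     pool = [c for c in contacts if (c.get("properties", {}).get("email") or "").lower() != exc]
--     if not pool:
--         return None
--
--     # Prefer DM-titled contacts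
--     dm_titled = [c for c in pool if is_dm_title(c["properties"].get("jobtitle") or "")]
--     if dm_titled:
--         return dm_titled[0]
--
--     # Then prefer non-generic emails
--     non_generic = [c for c in pool if not is_generic_email(c["properties"].get("email") or "")]
--     if non_generic:
--         return non_generic[0]
--
--     return pool[0]
-- ===== SOURCE B (Python) =====
-- DM_SIGNALS = [
--     "ceo", "founder", "co-founder", "cofounder", "owner", "director",
--     "cto", "coo", "president", "managing", "gerente", "fundador",
--     "propietari", "director general", "head of", "chief",
-- ]
--
-- GENERIC_PREFIXES = {
--     "info", "admin", "hola", "hello", "pedidos", "marketing", "press",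
--     "contact", "sales", "soporte", "support", "web", "almacen", "export",
--     "data", "tienda", "shop", "orders", "ayuda", "contacto", "store",
-- }
--
-- def is_generic_email(email):
--     if not email or "@" not in email:
--         return False
--     prefix = email.split("@")[0].lower()
--     return prefix in GENERIC_PREFIXES
--
-- def is_dm_title(title):
--     t = (title or "").lower()
--     return any(sig in t for sig in DM_SIGNALS)
--
-- def best_dm_from_contacts(contacts, exclude_email=None):
--     """Single pass: return the first DM-titled contact immediately; otherwise
--     remember the first non-generic-email contact and the first contact overall."""
--     exc = (exclude_email or "").lower()
--     first_overall = None
--     first_non_generic = None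
--     for c in contacts:
--         if (c.get("properties", {}).get("email") or "").lower() == exc:
--             continue
--         props = c["properties"]
--         if is_dm_title(props.get("jobtitle") or ""):
--             return c
--         if first_overall is None:
--             first_overall = c
--         if first_non_generic is None and not is_generic_email(props.get("email") or ""):
--             first_non_generic = c
--     return first_non_generic if first_non_generic is not None else first_overall
-- ===== Notes on version B (the rewrite author's own statement) =====
-- stated objective: alternative
-- what changed: A builds the pool and then makes three separate filtering passes (DM-titled, non-generic, fallback); B is a single loop over contacts that returns the first DM-titled survivor immediately and otherwise tracks the first non-generic and first overall survivor.
import Mathlib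
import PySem

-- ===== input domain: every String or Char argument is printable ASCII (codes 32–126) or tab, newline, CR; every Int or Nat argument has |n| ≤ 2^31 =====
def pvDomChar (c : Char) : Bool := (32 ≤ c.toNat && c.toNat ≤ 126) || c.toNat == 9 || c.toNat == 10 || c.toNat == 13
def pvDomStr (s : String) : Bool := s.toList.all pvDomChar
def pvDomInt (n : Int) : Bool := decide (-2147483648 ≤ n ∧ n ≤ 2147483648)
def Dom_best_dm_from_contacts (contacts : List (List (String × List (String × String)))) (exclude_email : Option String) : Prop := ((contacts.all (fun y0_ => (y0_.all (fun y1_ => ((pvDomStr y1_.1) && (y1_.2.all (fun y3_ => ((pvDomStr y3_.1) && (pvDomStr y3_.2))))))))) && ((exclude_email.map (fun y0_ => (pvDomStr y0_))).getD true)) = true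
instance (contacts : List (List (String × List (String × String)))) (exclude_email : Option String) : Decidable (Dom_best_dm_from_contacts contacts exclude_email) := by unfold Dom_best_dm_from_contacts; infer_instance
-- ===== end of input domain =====

-- B replaces A's three filtering passes over the pool by ONE loop with an early return on the
-- first DM-titled contact, tracking the first non-generic and first overall survivor (objective: alternative).

-- ===== PORT A =====
-- shared module helpers (DM_SIGNALS, GENERIC_PREFIXES, is_generic_email, is_dm_title), used by both Pythons
def pvDmSignals : List String :=
  ["ceo", "founder", "co-founder", "cofounder", "owner", "director",
   "cto", "coo", "president", "managing", "gerente", "fundador",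
   "propietari", "director general", "head of", "chief"]

def pvGenericPrefixes : List String :=
  ["info", "admin", "hola", "hello", "pedidos", "marketing", "press",
   "contact", "sales", "soporte", "support", "web", "almacen", "export",
   "data", "tienda", "shop", "orders", "ayuda", "contacto", "store"]

-- props.get(k) or ""  (a missing key and an empty string both yield "")
def pvGetStr (props : List (String × String)) (k : String) : String :=
  ((PySem.Dict.mk props).get? k).getD ""

-- c.get("properties", {}); where the Python subscripts c["properties"], Pre_ guarantees the key is
-- present, so the getD [] default is never taken there and the port is exact on Pre_.
def pvPropsD (c : List (String × List (String × String))) : List (String × String) :=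
  ((PySem.Dict.mk c).get? "properties").getD []

def is_generic_email (email : String) : Bool :=
  if email == "" || !(PySem.Str.isIn "@" email) then false
  else pvGenericPrefixes.contains (PySem.Str.lower (((PySem.Str.split? email "@").getD []).headD ""))

def is_dm_title (title : String) : Bool :=
  pvDmSignals.any (fun sig => PySem.Str.isIn sig (PySem.Str.lower title))

def best_dm_from_contacts (contacts : List (List (String × List (String × String)))) (exclude_email : Option String) : Option (List (String × List (String × String))) :=
  let exc := PySem.Str.lower (exclude_email.getD "")
  let pool := contacts.filter (fun c => PySem.Str.lower (pvGetStr (pvPropsD c) "email") != exc)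
  if pool.isEmpty then none
  else
    let dm_titled := pool.filter (fun c => is_dm_title (pvGetStr (pvPropsD c) "jobtitle"))
    if !dm_titled.isEmpty then dm_titled.head?
    else
      let non_generic := pool.filter (fun c => !(is_generic_email (pvGetStr (pvPropsD c) "email")))
      if !non_generic.isEmpty then non_generic.head?
      else pool.head?

-- ===== PORT B =====
-- the single loop of Source B: state = (first_non_generic, first_overall); early return on a DM title
def pvBestDmLoop (exc : String) : List (List (String × List (String × String))) → Option (List (String × List (String × String))) → Option (List (String × List (String × String))) → Option (List (String × List (String × String)))
  | [], fng, fo => if fng.isSome then fng else fo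
  | c :: rest, fng, fo =>
    if PySem.Str.lower (pvGetStr (pvPropsD c) "email") == exc then
      pvBestDmLoop exc rest fng fo
    else
      let props := pvPropsD c
      if is_dm_title (pvGetStr props "jobtitle") then some c
      else
        pvBestDmLoop exc rest
          (if fng.isNone && !(is_generic_email (pvGetStr props "email")) then some c else fng)
          (if fo.isNone then some c else fo)

def best_dm_from_contacts_alt (contacts : List (List (String × List (String × String)))) (exclude_email : Option String) : Option (List (String × List (String × String))) :=
  pvBestDmLoop (PySem.Str.lower (exclude_email.getD "")) contacts none none

-- ===== PRECONDITION & SPEC =====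
-- Pre_ excludes inputs on which the Python A raises KeyError: a contact that survives the
-- exclude-email filter but has no "properties" key (A subscripts c["properties"]).
def Pre_best_dm_from_contacts (contacts : List (List (String × List (String × String)))) (exclude_email : Option String) : Prop :=
  ∀ c ∈ contacts,
    PySem.Str.lower (pvGetStr (pvPropsD c) "email") ≠ PySem.Str.lower (exclude_email.getD "") →
    ((PySem.Dict.mk c).get? "properties").isSome = true
instance (contacts : List (List (String × List (String × String)))) (exclude_email : Option String) : Decidable (Pre_best_dm_from_contacts contacts exclude_email) := by unfold Pre_best_dm_from_contacts; infer_instance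

def pvWitness_best_dm_from_contacts : (List (List (String × List (String × String)))) × Option String :=
  ([[("properties", [("email", "ana@b.com"), ("jobtitle", "CEO")])],
    [("properties", [("email", "info@b.com")])]], some "x@y.com")

def Spec_best_dm_from_contacts (contacts : List (List (String × List (String × String)))) (exclude_email : Option String) (out : Option (List (String × List (String × String)))) : Prop := out = best_dm_from_contacts_alt contacts exclude_email
instance (contacts : List (List (String × List (String × String)))) (exclude_email : Option String) (out : Option (List (String × List (String × String)))) : Decidable (Spec_best_dm_from_contacts contacts exclude_email out) := by unfold Spec_best_dm_from_contacts; infer_instance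

-- ===== CLAIM (what is proved, stated in full; the proofs are below) =====
def Claim_equal_best_dm_from_contacts : Prop := ∀ (contacts : List (List (String × List (String × String)))) (exclude_email : Option String), Dom_best_dm_from_contacts contacts exclude_email → Pre_best_dm_from_contacts contacts exclude_email → Spec_best_dm_from_contacts contacts exclude_email (best_dm_from_contacts contacts exclude_email)

-- ===== LEMMAS AND PROOFS =====

-- loop invariant: the single pass computes the or-chain of A's three passes over the pool
theorem pvBestDmLoop_eq (exc : String) (l : List (List (String × List (String × String))))
    (fng fo : Option (List (String × List (String × String)))) :
    pvBestDmLoop exc l fng fo =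
      Option.or
        ((l.filter (fun c => PySem.Str.lower (pvGetStr (pvPropsD c) "email") != exc)).find?
          (fun c => is_dm_title (pvGetStr (pvPropsD c) "jobtitle")))
        (Option.or
          (Option.or fng
            ((l.filter (fun c => PySem.Str.lower (pvGetStr (pvPropsD c) "email") != exc)).find?
              (fun c => !(is_generic_email (pvGetStr (pvPropsD c) "email")))))
          (Option.or fo
            ((l.filter (fun c => PySem.Str.lower (pvGetStr (pvPropsD c) "email") != exc)).head?))) := by
  induction l generalizing fng fo with
  | nil =>
    simp only [List.filter_nil, List.find?_nil, List.head?_nil, Option.or_none, Option.none_or,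
      pvBestDmLoop]
    cases fng <;> cases fo <;> rfl
  | cons c rest ih =>
    by_cases hx : PySem.Str.lower (pvGetStr (pvPropsD c) "email") = exc
    · have hf : (PySem.Str.lower (pvGetStr (pvPropsD c) "email") != exc) = false := by
        simp [hx]
      have hxb : (PySem.Str.lower (pvGetStr (pvPropsD c) "email") == exc) = true := by
        simp [hx]
      simp only [pvBestDmLoop, hxb, if_true, List.filter_cons, hf, Bool.false_eq_true, if_false]
      exact ih fng fo
    · have hf : (PySem.Str.lower (pvGetStr (pvPropsD c) "email") != exc) = true := by
        simp [hx]
      have hxb : (PySem.Str.lower (pvGetStr (pvPropsD c) "email") == exc) = false := by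
        simp [hx]
      by_cases hdm : is_dm_title (pvGetStr (pvPropsD c) "jobtitle") = true
      · simp only [pvBestDmLoop, hxb, Bool.false_eq_true, if_false, hdm, if_true,
          List.filter_cons, hf, List.find?_cons, Option.some_or]
      · have hdmf : is_dm_title (pvGetStr (pvPropsD c) "jobtitle") = false := by
          simpa using hdm
        simp only [pvBestDmLoop, hxb, Bool.false_eq_true, if_false, hdmf, ih,
          List.filter_cons, hf, if_true, List.find?_cons, List.head?_cons]
        cases fng with
        | some v =>
          simp only [Option.isNone_some, Bool.false_and, if_false, Option.some_or]
          cases fo <;> simp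
        | none =>
          cases fo <;> by_cases hg : is_generic_email (pvGetStr (pvPropsD c) "email") = true <;>
            simp [hg]

-- ===== VERDICT (by name: the statement is the Claim_ definition above) =====
theorem best_dm_from_contacts_spec : Claim_equal_best_dm_from_contacts := by
  intro contacts exclude_email _ _
  unfold Spec_best_dm_from_contacts best_dm_from_contacts best_dm_from_contacts_alt
  rw [pvBestDmLoop_eq]
  simp only [Option.none_or]
  set exc := PySem.Str.lower (exclude_email.getD "")
  set pool := contacts.filter (fun c => PySem.Str.lower (pvGetStr (pvPropsD c) "email") != exc) with hpool
  by_cases hp : pool.isEmpty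
  · have hnil : pool = [] := List.isEmpty_iff.mp hp
    simp [hp, hnil]
  · simp only [hp, Bool.not_false, if_true, if_false]
    rw [List.head?_filter, List.head?_filter]
    cases hdm : pool.find? (fun c => is_dm_title (pvGetStr (pvPropsD c) "jobtitle")) with
    | some v =>
      have : ¬ (pool.filter (fun c => is_dm_title (pvGetStr (pvPropsD c) "jobtitle"))).isEmpty = true := by
        rw [List.isEmpty_iff, ← List.head?_eq_none_iff, List.head?_filter, hdm]
        simp
      simp only [this, Bool.not_false, if_true, if_false, hdm, Option.some_or]
      simp
    | none =>
      have hdme : (pool.filter (fun c => is_dm_title (pvGetStr (pvPropsD c) "jobtitle"))).isEmpty = true := by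
        rw [List.isEmpty_iff, ← List.head?_eq_none_iff, List.head?_filter, hdm]
      simp only [hdme, Bool.not_true, if_false, hdm, Option.none_or]
      cases hng : pool.find? (fun c => !(is_generic_email (pvGetStr (pvPropsD c) "email"))) with
      | some v =>
        have : ¬ (pool.filter (fun c => !(is_generic_email (pvGetStr (pvPropsD c) "email")))).isEmpty = true := by
          rw [List.isEmpty_iff, ← List.head?_eq_none_iff, List.head?_filter, hng]
          simp
        simp only [this, Bool.not_false, if_true, if_false, Option.some_or]
        simp
      | none =>
        have hnge : (pool.filter (fun c => !(is_generic_email (pvGetStr (pvPropsD c) "email")))).isEmpty = true := by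
          rw [List.isEmpty_iff, ← List.head?_eq_none_iff, List.head?_filter, hng]
        simp [hnge]
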